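-- pv_equiv track=rewrite | github.com/mrbahrani/nlp_p1 | phonetics/text_parser.py | parse
-- ===== SOURCE A (Python) =====
-- def parse(text_to_phonetic, text: str):
--     all_possible_phonetics = [""]
--     word_list = text.split(" ")
--     for word in word_list:
--         new_all_possible_list = list()
--         for phonetic in text_to_phonetic[word]:
--             tmp_list = all_possible_phonetics[:]
--             for itr in range(len(tmp_list)):
--                 new_all_possible_list.append(tmp_list[itr] + phonetic)
--         all_possible_phonetics = new_all_possible_list
--     return all_possible_phonetics
-- ===== SOURCE B (Python) =====
-- def parse(text_to_phonetic, text: str):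
--     # Recursive Cartesian product of per-word phonetic lists (factors in reversed
--     # word order so the first word varies fastest, as in A), joined once at the end.
--     def product(lists):
--         if not lists:
--             return [[]]
--         rests = product(lists[1:])
--         return [[x] + rest for x in lists[0] for rest in rests]
--
--     lists = [text_to_phonetic[word] for word in reversed(text.split(" "))]
--     return ["".join(reversed(combo)) for combo in product(lists)]
-- ===== Notes on version B (the rewrite author's own statement) =====
-- stated objective: alternative
-- what changed: Replaces A's incremental fold (rebuilding the whole accumulator string list at every word) by a recursive Cartesian product over the per-word phonetic lists (in reversed word order, matching A's first-word-fastest ordering), joining each combination once at the end.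
import Mathlib
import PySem

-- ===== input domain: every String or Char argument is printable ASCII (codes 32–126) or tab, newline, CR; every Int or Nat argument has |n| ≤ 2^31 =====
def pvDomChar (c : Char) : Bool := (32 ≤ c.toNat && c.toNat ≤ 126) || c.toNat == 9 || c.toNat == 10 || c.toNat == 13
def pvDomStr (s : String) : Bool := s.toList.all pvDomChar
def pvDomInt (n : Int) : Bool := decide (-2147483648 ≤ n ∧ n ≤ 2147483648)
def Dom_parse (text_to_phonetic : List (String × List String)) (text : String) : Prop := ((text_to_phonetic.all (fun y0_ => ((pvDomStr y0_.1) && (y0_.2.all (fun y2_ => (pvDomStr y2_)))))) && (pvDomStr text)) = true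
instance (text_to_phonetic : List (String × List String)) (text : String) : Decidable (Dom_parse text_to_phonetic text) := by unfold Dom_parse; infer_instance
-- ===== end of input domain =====

-- B replaces A's incremental accumulator fold by a recursive Cartesian product of the
-- per-word phonetic lists (reversed word order), joining each combination once; same cost.


-- ===== PORT A =====
-- text_to_phonetic[word]: first-match association-list lookup (List.lookup);
-- Pre_parse guarantees the key is present, so .getD [] is never taken on admitted inputs.
def parse (text_to_phonetic : List (String × List String)) (text : String) : List String :=
  let word_list := (PySem.Str.split? text " ").getD []
  word_list.foldl
    (fun all_possible_phonetics word =>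
      ((text_to_phonetic.lookup word).getD []).foldl
        (fun new_all_possible_list phonetic =>
          new_all_possible_list ++ all_possible_phonetics.map (fun s => s ++ phonetic))
        [])
    [""]

-- ===== PORT B =====
-- recursive helper `product` of Source B
def prodLists : List (List String) → List (List String)
  | [] => [[]]
  | l :: ls =>
    let rests := prodLists ls
    l.flatMap (fun x => rests.map (fun rest => x :: rest))

def parse_alt (text_to_phonetic : List (String × List String)) (text : String) : List String :=
  let lists := (((PySem.Str.split? text " ").getD []).reverse).map
    (fun word => (text_to_phonetic.lookup word).getD [])
  (prodLists lists).map (fun combo => PySem.Str.join "" combo.reverse)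

-- ===== PRECONDITION & SPEC =====
-- Pre_ excludes exactly the inputs where some word of the text is not a key of the
-- dictionary: there Python A (and B) raise KeyError.
def Pre_parse (text_to_phonetic : List (String × List String)) (text : String) : Prop :=
  ∀ w ∈ (PySem.Str.split? text " ").getD [], (text_to_phonetic.lookup w).isSome = true
instance (text_to_phonetic : List (String × List String)) (text : String) : Decidable (Pre_parse text_to_phonetic text) := by unfold Pre_parse; infer_instance

def pvWitness_parse : (List (String × List String)) × String :=
  ([("a", ["X", "Y"]), ("b", ["Z"])], "a b")

def Spec_parse (text_to_phonetic : List (String × List String)) (text : String) (out : List String) : Prop := out = parse_alt text_to_phonetic text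
instance (text_to_phonetic : List (String × List String)) (text : String) (out : List String) : Decidable (Spec_parse text_to_phonetic text out) := by unfold Spec_parse; infer_instance

-- ===== CLAIM (what is proved, stated in full; the proofs are below) =====
def Claim_equal_parse : Prop := ∀ (text_to_phonetic : List (String × List String)) (text : String), Dom_parse text_to_phonetic text → Pre_parse text_to_phonetic text → Spec_parse text_to_phonetic text (parse text_to_phonetic text)

-- ===== LEMMAS AND PROOFS =====

-- ''.join with empty separator distributes over a trailing singleton (List Char level)
lemma cjoin_snoc (xs : List (List Char)) (p : List Char) :
    PySem.Chars.join [] (xs ++ [p]) = PySem.Chars.join [] xs ++ p := by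
  induction xs with
  | nil => simp [PySem.Chars.join_singleton, PySem.Chars.join_nil]
  | cons a rest ih =>
    cases rest with
    | nil =>
      simp [PySem.Chars.join_cons_cons, PySem.Chars.join_singleton]
    | cons b r =>
      simp only [List.cons_append, PySem.Chars.join_cons_cons] at *
      simp [ih, List.append_assoc]

lemma sjoin_snoc (xs : List String) (p : String) :
    PySem.Str.join "" (xs ++ [p]) = PySem.Str.join "" xs ++ p := by
  simp only [PySem.Str.join, List.map_append, List.map_cons, List.map_nil]
  rw [show ("" : String).toList = [] from rfl, cjoin_snoc, String.ofList_append,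
    String.ofList_toList]

lemma sjoin_nil : PySem.Str.join "" ([] : List String) = "" := by
  simp [PySem.Str.join, PySem.Chars.join_nil]

-- main loop correspondence: A's fold over the words equals B's product-then-join
lemma fold_eq_prod (t2p : List (String × List String)) (ws : List String) :
    ws.foldl
      (fun all_possible_phonetics word =>
        ((t2p.lookup word).getD []).foldl
          (fun new_all_possible_list phonetic =>
            new_all_possible_list ++ all_possible_phonetics.map (fun s => s ++ phonetic))
          [])
      [""]
    = (prodLists ((ws.reverse).map (fun word => (t2p.lookup word).getD []))).map
        (fun combo => PySem.Str.join "" combo.reverse) := by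
  induction ws using List.reverseRecOn with
  | nil => simp [prodLists, sjoin_nil]
  | append_singleton ws w ih =>
    rw [List.foldl_append, List.foldl_cons, List.foldl_nil, ih]
    rw [List.reverse_append, List.reverse_singleton, List.singleton_append, List.map_cons]
    rw [show ∀ l ls, prodLists (l :: ls) = l.flatMap (fun x => (prodLists ls).map (x :: ·)) from fun _ _ => rfl]
    rw [PySem.List.foldl_append_eq_flatMap (fun ph => List.map (fun s => s ++ ph) _)]
    simp only [List.nil_append, List.map_flatMap, List.map_map, Function.comp_def,
      List.reverse_cons, sjoin_snoc]

-- ===== VERDICT (by name: the statement is the Claim_ definition above) =====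
theorem parse_spec : Claim_equal_parse := by
  intro t2p text _ _
  unfold Spec_parse parse parse_alt
  exact fold_eq_prod t2p _
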